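-- pv_equiv track=rewrite | github.com/Latifkhonov/Big-Data-Project | homework3.py | generateTransitionTable
-- ===== SOURCE A (Python) =====
-- def generateTransitionTable(text, k=4):
--     T = {}
--     for i in range(len(text) - k):
--         seq = text[i:i+k]
--         next_char = text[i+k]
--
--         if seq not in T:
--             T[seq] = {}
--         if next_char not in T[seq]:
--             T[seq][next_char] = 0
--         T[seq][next_char] += 1
--     return T
-- ===== SOURCE B (Python) =====
-- def generateTransitionTable(text, k=4):
--     # Pass 1: flat frequency table over (k-gram, next-char) pairs.
--     counts = {}
--     for i in range(len(text) - k):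
--         key = (text[i:i+k], text[i+k])
--         counts[key] = counts.get(key, 0) + 1
--     # Pass 2: reshape the flat table into the nested transition dict.
--     T = {}
--     for (seq, ch), n in counts.items():
--         T.setdefault(seq, {})[ch] = n
--     return T
-- ===== Notes on version B (the rewrite author's own statement) =====
-- stated objective: alternative
-- what changed: B decomposes the work into two passes: a first pass that accumulates a flat (k-gram, next-char) -> count table, and a second reshape pass that folds that flat table into the nested dict with setdefault, instead of A's single loop that conditionally creates and increments nested dict entries in place.
import Mathlib
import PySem

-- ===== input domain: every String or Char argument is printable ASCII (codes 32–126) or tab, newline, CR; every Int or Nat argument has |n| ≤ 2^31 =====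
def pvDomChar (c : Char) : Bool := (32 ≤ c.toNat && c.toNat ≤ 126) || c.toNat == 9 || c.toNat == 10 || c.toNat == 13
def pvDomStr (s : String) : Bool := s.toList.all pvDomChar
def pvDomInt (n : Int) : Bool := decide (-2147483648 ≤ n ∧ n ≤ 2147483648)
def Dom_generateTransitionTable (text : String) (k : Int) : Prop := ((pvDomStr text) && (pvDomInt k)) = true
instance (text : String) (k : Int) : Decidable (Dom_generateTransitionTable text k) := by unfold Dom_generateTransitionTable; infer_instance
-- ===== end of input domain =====

-- B restructures A's single nested-dict-updating loop into two passes (a flat (k-gram, next-char)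
-- count table, then a reshape fold into the nested table); same cost, same return value.

-- text[j] as a 1-character string (Python 'text[j]'); Pre_ guarantees the index is in range,
-- so the "" default is never the value used.
def pvCharAt (text : String) (j : Int) : String :=
  ((PySem.Str.pyGet? text j).map (fun c => String.ofList [c])).getD ""

-- ===== PORT A =====
def generateTransitionTable (text : String) (k : Int) : List (String × List (String × Int)) :=
  -- T = {}; for i in range(len(text) - k): …
  let T := (PySem.List.pyRange 0 (PySem.Str.len text - k) 1).foldl
    (fun T i =>
      let seq := PySem.Str.slice text (some i) (some (i + k))
      let next_char := pvCharAt text (i + k)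
      -- if seq not in T: T[seq] = {}
      let T := if T.contains seq then T else T.insert seq PySem.Dict.empty
      let inner := T.getD seq PySem.Dict.empty
      -- if next_char not in T[seq]: T[seq][next_char] = 0
      let inner := if inner.contains next_char then inner else inner.insert next_char 0
      -- T[seq][next_char] += 1
      T.insert seq (inner.insert next_char (inner.getD next_char 0 + 1)))
    PySem.Dict.empty
  T.items.map (fun p => (p.1, p.2.items))

-- ===== PORT B =====
def generateTransitionTable_alt (text : String) (k : Int) : List (String × List (String × Int)) :=
  -- pass 1: counts[(text[i:i+k], text[i+k])] = counts.get(key, 0) + 1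
  let counts : PySem.Dict (String × String) Int :=
    (PySem.List.pyRange 0 (PySem.Str.len text - k) 1).foldl
      (fun d i =>
        let key := (PySem.Str.slice text (some i) (some (i + k)), pvCharAt text (i + k))
        d.insert key (d.getD key 0 + 1))
      PySem.Dict.empty
  -- pass 2: for (seq, ch), n in counts.items(): T.setdefault(seq, {})[ch] = n
  let T := counts.items.foldl
    (fun T q => T.insert q.1.1 ((T.getD q.1.1 PySem.Dict.empty).insert q.1.2 q.2))
    PySem.Dict.empty
  T.items.map (fun p => (p.1, p.2.items))

-- ===== PRECONDITION & SPEC =====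
-- Pre_ excludes exactly the inputs where Python A raises IndexError: when k < -len(text),
-- text[0+k] on the loop's first iteration is an out-of-range negative index.
def Pre_generateTransitionTable (text : String) (k : Int) : Prop :=
  -(PySem.Str.len text) ≤ k
instance (text : String) (k : Int) : Decidable (Pre_generateTransitionTable text k) := by
  unfold Pre_generateTransitionTable; infer_instance

def pvWitness_generateTransitionTable : String × Int := ("abcabd", 2)

def Spec_generateTransitionTable (text : String) (k : Int) (out : List (String × List (String × Int))) : Prop := out = generateTransitionTable_alt text k
instance (text : String) (k : Int) (out : List (String × List (String × Int))) : Decidable (Spec_generateTransitionTable text k out) := by unfold Spec_generateTransitionTable; infer_instance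

-- ===== CLAIM (what is proved, stated in full; the proofs are below) =====
def Claim_equal_generateTransitionTable : Prop := ∀ (text : String) (k : Int), Dom_generateTransitionTable text k → Pre_generateTransitionTable text k → Spec_generateTransitionTable text k (generateTransitionTable text k)

-- ===== LEMMAS AND PROOFS =====
def pvStepN (T : PySem.Dict String (PySem.Dict String Int)) (p : String × String) :
    PySem.Dict String (PySem.Dict String Int) :=
  T.insert p.1 ((T.getD p.1 PySem.Dict.empty).modify p.2 0 (· + 1))
def pvStepR (T : PySem.Dict String (PySem.Dict String Int)) (q : (String × String) × Int) :
    PySem.Dict String (PySem.Dict String Int) :=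
  T.insert q.1.1 ((T.getD q.1.1 PySem.Dict.empty).insert q.1.2 q.2)
def pvProj (s : String) (L : List (String × String)) : List String :=
  (L.filter (fun p => p.1 == s)).map (·.2)

theorem pvBodyA_eq (T : PySem.Dict String (PySem.Dict String Int)) (s c : String) :
    (let T' := if T.contains s then T else T.insert s PySem.Dict.empty
     let inner := T'.getD s PySem.Dict.empty
     let inner' := if inner.contains c then inner else inner.insert c 0
     T'.insert s (inner'.insert c (inner'.getD c 0 + 1))) = pvStepN T (s, c) := by
  simp only [pvStepN, PySem.Dict.modify]
  by_cases hT : T.contains s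
  · simp only [hT, if_true]
    by_cases hc : (T.getD s PySem.Dict.empty).contains c
    · simp [hc]
    · have h0 : (T.getD s PySem.Dict.empty).getD c 0 = 0 :=
        PySem.Dict.getD_of_not_contains _ _ (by simpa using hc)
      simp [hc, h0, PySem.Dict.getD_insert_self, PySem.Dict.insert_insert_self]
  · have h0 : T.getD s PySem.Dict.empty = PySem.Dict.empty :=
      PySem.Dict.getD_of_not_contains _ _ (by simpa using hT)
    simp [hT, h0, PySem.Dict.getD_insert_self, PySem.Dict.insert_insert_self,
      PySem.Dict.contains_empty, PySem.Dict.getD_empty]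

theorem pvInnerA (L : List (String × String)) (T : PySem.Dict String (PySem.Dict String Int)) (s : String) :
    (L.foldl pvStepN T).getD s PySem.Dict.empty
      = (pvProj s L).foldl (fun d c => d.modify c 0 (· + 1)) (T.getD s PySem.Dict.empty) := by
  induction L generalizing T with
  | nil => simp [pvProj]
  | cons p L ih =>
    simp only [List.foldl_cons, ih, pvProj, List.filter_cons]
    by_cases h : p.1 = s
    · simp [h, pvStepN, PySem.Dict.getD_insert_self]
    · have hne : s ≠ p.1 := fun e => h e.symm
      simp [h, pvStepN, PySem.Dict.getD_insert_of_ne _ _ _ hne]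

theorem pvInnerB (its : List ((String × String) × Int)) (T : PySem.Dict String (PySem.Dict String Int)) (s : String) :
    (its.foldl pvStepR T).getD s PySem.Dict.empty
      = ((its.filter (fun q => q.1.1 == s)).map (fun q => (q.1.2, q.2))).foldl
          (fun d p => d.insert p.1 p.2) (T.getD s PySem.Dict.empty) := by
  induction its generalizing T with
  | nil => simp
  | cons q its ih =>
    simp only [List.foldl_cons, ih, List.filter_cons]
    by_cases h : q.1.1 = s
    · simp [h, pvStepR, PySem.Dict.getD_insert_self]
    · have hne : s ≠ q.1.1 := fun e => h e.symm
      simp [h, pvStepR, PySem.Dict.getD_insert_of_ne _ _ _ hne]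

theorem pvOfList_filter {α : Type} [BEq α] [LawfulBEq α] (p : α → Bool) (L : List α) :
    (PySem.Set.ofList L).filter p = PySem.Set.ofList (L.filter p) := by
  induction L using List.reverseRecOn with
  | nil => simp [PySem.Set.ofList_nil]
  | append_singleton xs x ih =>
    rw [PySem.Set.ofList_append_singleton, List.filter_append, PySem.Set.ofList_append]
    by_cases hx : x ∈ xs
    · rw [PySem.Set.add_of_mem (by simpa [PySem.Set.mem_ofList] using hx)]
      by_cases hp : p x = true
      · have hxf : x ∈ xs.filter p := List.mem_filter.mpr ⟨hx, hp⟩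
        simp [hp, PySem.Set.update_cons, PySem.Set.update_nil,
          PySem.Set.add_of_mem ((PySem.Set.mem_ofList _ _).mpr hxf), ih]
      · simp [hp, PySem.Set.update_nil, ih]
    · rw [PySem.Set.add_of_not_mem (by simpa [PySem.Set.mem_ofList] using hx), List.filter_append]
      by_cases hp : p x = true
      · have hxf : x ∉ xs.filter p := fun hm => hx (List.mem_filter.mp hm).1
        simp [hp, ih, PySem.Set.update_cons, PySem.Set.update_nil,
          PySem.Set.add_of_not_mem (fun hm => hxf ((PySem.Set.mem_ofList _ _).mp hm))]
      · simp [hp, ih, PySem.Set.update_nil]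

theorem pvOfList_map {α β : Type} [BEq α] [LawfulBEq α] [BEq β] [LawfulBEq β]
    (f : α → β) (L : List α) :
    PySem.Set.ofList (List.map f (PySem.Set.ofList L)) = PySem.Set.ofList (List.map f L) := by
  induction L using List.reverseRecOn with
  | nil => simp
  | append_singleton xs x ih =>
    rw [PySem.Set.ofList_append_singleton, List.map_append]
    by_cases hx : x ∈ xs
    · rw [PySem.Set.add_of_mem (by simpa [PySem.Set.mem_ofList] using hx), ih,
        PySem.Set.ofList_append]
      have : f x ∈ PySem.Set.ofList (List.map f xs) := by
        simp [PySem.Set.mem_ofList]; exact ⟨x, hx, rfl⟩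
      simp [PySem.Set.update_cons, PySem.Set.update_nil, PySem.Set.add_of_mem this]
    · rw [PySem.Set.add_of_not_mem (by simpa [PySem.Set.mem_ofList] using hx), List.map_append,
        PySem.Set.ofList_append, PySem.Set.ofList_append]
      simp [PySem.Set.update_cons, PySem.Set.update_nil, ih]

theorem pvMap_ofList_inj {α β : Type} [BEq α] [LawfulBEq α] [BEq β] [LawfulBEq β]
    (f : α → β) (L : List α) (hinj : ∀ x ∈ L, ∀ y ∈ L, f x = f y → x = y) :
    List.map f (PySem.Set.ofList L) = PySem.Set.ofList (List.map f L) := by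
  induction L using List.reverseRecOn with
  | nil => simp
  | append_singleton xs x ih =>
    have hinj' : ∀ a ∈ xs, ∀ b ∈ xs, f a = f b → a = b := by
      intro a ha b hb; exact hinj a (by simp [ha]) b (by simp [hb])
    rw [PySem.Set.ofList_append_singleton, List.map_append, PySem.Set.ofList_append]
    by_cases hx : x ∈ xs
    · rw [PySem.Set.add_of_mem (by simpa [PySem.Set.mem_ofList] using hx)]
      have : f x ∈ PySem.Set.ofList (List.map f xs) := by
        simp [PySem.Set.mem_ofList]; exact ⟨x, hx, rfl⟩
      simp [PySem.Set.update_cons, PySem.Set.update_nil, PySem.Set.add_of_mem this, ih hinj']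
    · rw [PySem.Set.add_of_not_mem (by simpa [PySem.Set.mem_ofList] using hx), List.map_append]
      have hfx : f x ∉ PySem.Set.ofList (List.map f xs) := by
        simp only [PySem.Set.mem_ofList, List.mem_map]
        rintro ⟨y, hy, hfy⟩
        exact hx (hinj x (by simp) y (by simp [hy]) hfy.symm ▸ hy)
      simp [PySem.Set.update_cons, PySem.Set.update_nil, ih hinj',
        PySem.Set.add_of_not_mem hfx]

theorem pvCount_proj (L : List (String × String)) (s c : String) :
    (pvProj s L).count c = L.count (s, c) := by
  induction L with
  | nil => simp [pvProj]
  | cons p L ih =>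
    simp only [pvProj, List.filter_cons] at *
    by_cases h : p.1 = s
    · by_cases h2 : p.2 = c
      · have hp : p = (s, c) := by cases p; simp_all
        simp [hp, ih]
      · have hp : p ≠ (s, c) := by cases p; simp_all
        simp [h, h2, hp, ih]
    · have hp : p ≠ (s, c) := by cases p; simp_all
      simp [h, hp, ih]

theorem pvMain (L : List (String × String)) :
    L.foldl pvStepN PySem.Dict.empty
      = (PySem.Dict.counter L).items.foldl pvStepR PySem.Dict.empty := by
  have hkA : (L.foldl pvStepN PySem.Dict.empty).keys = PySem.Set.ofList (L.map (·.1)) := by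
    exact PySem.Dict.keys_foldl_insert_key L (fun p => p.1)
      (fun T p => (T.getD p.1 PySem.Dict.empty).modify p.2 0 (· + 1)) PySem.Dict.empty
  have hnA : (L.foldl pvStepN PySem.Dict.empty).keys.Nodup := by
    rw [hkA]; exact PySem.Set.nodup_ofList _
  have hkB : ((PySem.Dict.counter L).items.foldl pvStepR PySem.Dict.empty).keys
      = PySem.Set.ofList (L.map (·.1)) := by
    have h := PySem.Dict.keys_foldl_insert_key (PySem.Dict.counter L).items (fun q => q.1.1)
      (fun T q => (T.getD q.1.1 PySem.Dict.empty).insert q.1.2 q.2) PySem.Dict.empty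
    have h' : ((PySem.Dict.counter L).items.foldl pvStepR PySem.Dict.empty).keys
        = PySem.Set.update PySem.Dict.empty.keys ((PySem.Dict.counter L).items.map (fun q => q.1.1)) := h
    rw [h', PySem.Dict.keys_empty, PySem.Set.update_nil_left,
      PySem.Dict.items_counter L, List.map_map]
    have hc : ((fun q : (String × String) × Int => q.1.1) ∘ (fun k => (k, (L.count k : Int))))
        = fun q : String × String => q.1 := by funext q; rfl
    rw [hc]
    exact pvOfList_map (fun p => p.1) L
  have hnB : ((PySem.Dict.counter L).items.foldl pvStepR PySem.Dict.empty).keys.Nodup := by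
    rw [hkB]; exact PySem.Set.nodup_ofList _
  have hinner : ∀ s, (L.foldl pvStepN PySem.Dict.empty).getD s PySem.Dict.empty
      = ((PySem.Dict.counter L).items.foldl pvStepR PySem.Dict.empty).getD s PySem.Dict.empty := by
    intro s
    rw [pvInnerA, pvInnerB, PySem.Dict.getD_empty, ← PySem.Dict.counter_eq_foldl]
    have hP : ((PySem.Dict.counter L).items.filter (fun q => q.1.1 == s)).map (fun q => (q.1.2, q.2))
        = (PySem.Dict.counter (pvProj s L)).items := by
      rw [PySem.Dict.items_counter L, List.filter_map, List.map_map]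
      have hcomp : ((fun q : (String × String) × Int => q.1.1 == s) ∘ (fun k => (k, (L.count k : Int))))
          = fun q : String × String => q.1 == s := by funext q; rfl
      rw [hcomp, pvOfList_filter (fun q : String × String => q.1 == s) L]
      have hmem : ∀ q ∈ PySem.Set.ofList (L.filter (fun q => q.1 == s)), q.1 = s := by
        intro q hq
        have := (PySem.Set.mem_ofList _ _).mp hq
        simpa using (List.mem_filter.mp this).2
      rw [PySem.Dict.items_counter (pvProj s L)]
      calc (PySem.Set.ofList (L.filter (fun q => q.1 == s))).map
            ((fun q : (String × String) × Int => (q.1.2, q.2)) ∘ (fun k => (k, (L.count k : Int))))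
          = (PySem.Set.ofList (L.filter (fun q => q.1 == s))).map
            ((fun c => (c, ((pvProj s L).count c : Int))) ∘ (fun q : String × String => q.2)) := by
            apply List.map_congr_left
            intro q hq
            have h1 : q = (s, q.2) := by have := hmem q hq; cases q; simp_all
            simp only [Function.comp]
            have h2 : (pvProj s L).count q.2 = L.count q := by rw [pvCount_proj, ← h1]
            rw [h2]
        _ = ((PySem.Set.ofList (L.filter (fun q => q.1 == s))).map (fun q : String × String => q.2)).map
            (fun c => (c, ((pvProj s L).count c : Int))) := by rw [List.map_map]
        _ = (PySem.Set.ofList (pvProj s L)).map (fun c => (c, ((pvProj s L).count c : Int))) := by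
            rw [pvMap_ofList_inj (fun q : String × String => q.2) (L.filter (fun q => q.1 == s))
              (by intro x hx y hy hxy
                  have hxs := (List.mem_filter.mp hx).2
                  have hys := (List.mem_filter.mp hy).2
                  cases x; cases y; simp_all)]
            rfl
    rw [hP]
    have hfresh := PySem.Dict.items_foldl_insert_fresh (PySem.Dict.counter (pvProj s L)).items
      (fun p => p.1) (fun p => p.2) PySem.Dict.empty
      (by intro a _; simp [PySem.Dict.contains_empty])
      (by rw [PySem.Dict.items_counter (pvProj s L), List.map_map]
          have hc2 : ((fun p : String × Int => p.1) ∘ (fun k => (k, ((pvProj s L).count k : Int))))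
              = fun c : String => c := by funext c; rfl
          rw [hc2, List.map_id']
          exact PySem.Set.nodup_ofList _)
    apply PySem.Dict.ext
    simpa using hfresh.symm
  apply PySem.Dict.ext
  rw [PySem.Dict.items_eq_map_keys _ hnA PySem.Dict.empty,
      PySem.Dict.items_eq_map_keys _ hnB PySem.Dict.empty, hkA, hkB]
  exact List.map_congr_left (fun x _ => by rw [hinner x])

theorem pvFinal (text : String) (k : Int) :
    generateTransitionTable text k = generateTransitionTable_alt text k := by
  unfold generateTransitionTable generateTransitionTable_alt
  have hA : (PySem.List.pyRange 0 (PySem.Str.len text - k) 1).foldl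
      (fun T i =>
        let seq := PySem.Str.slice text (some i) (some (i + k))
        let next_char := pvCharAt text (i + k)
        let T := if T.contains seq then T else T.insert seq PySem.Dict.empty
        let inner := T.getD seq PySem.Dict.empty
        let inner := if inner.contains next_char then inner else inner.insert next_char 0
        T.insert seq (inner.insert next_char (inner.getD next_char 0 + 1)))
      PySem.Dict.empty
      = ((PySem.List.pyRange 0 (PySem.Str.len text - k) 1).map
          (fun i => (PySem.Str.slice text (some i) (some (i + k)), pvCharAt text (i + k)))).foldl
          pvStepN PySem.Dict.empty := by
    rw [List.foldl_map]
    congr 1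
    funext T i
    exact pvBodyA_eq T (PySem.Str.slice text (some i) (some (i + k))) (pvCharAt text (i + k))
  have hB : (PySem.List.pyRange 0 (PySem.Str.len text - k) 1).foldl
      (fun d i =>
        let key := (PySem.Str.slice text (some i) (some (i + k)), pvCharAt text (i + k))
        d.insert key (d.getD key 0 + 1))
      (PySem.Dict.empty : PySem.Dict (String × String) Int)
      = PySem.Dict.counter ((PySem.List.pyRange 0 (PySem.Str.len text - k) 1).map
          (fun i => (PySem.Str.slice text (some i) (some (i + k)), pvCharAt text (i + k)))) := by
    rw [← PySem.Dict.foldl_insert_getD_add_one_eq_counter, List.foldl_map]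
  simp only [hA, hB]
  have := pvMain ((PySem.List.pyRange 0 (PySem.Str.len text - k) 1).map
          (fun i => (PySem.Str.slice text (some i) (some (i + k)), pvCharAt text (i + k))))
  rw [this]
  rfl

-- ===== VERDICT (by name: the statement is the Claim_ definition above) =====
theorem generateTransitionTable_spec : Claim_equal_generateTransitionTable := by
  intro text k _ _
  exact pvFinal text k
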